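-- pv_equiv track=rewrite | github.com/AliceAndBobCandy/EvoIoT | util.py | get_bin_number
-- ===== SOURCE A (Python) =====
-- bin_split_port = [0,1024,49152,65535]
--
-- def get_bin_number(ports):
--     if len(ports) == 0:
--         return [0]*4
--     feature = []
--     for idx in range(len(bin_split_port)-1):
--         tmp = [x for x in ports if (x>= bin_split_port[idx] and x<bin_split_port[idx+1])]
--         feature.append(len(tmp))
--     return feature
-- ===== SOURCE B (Python) =====
-- def get_bin_number(ports):
--     if len(ports) == 0:
--         return [0] * 4
--     feature = [0, 0, 0]
--     for x in ports:
--         if 0 <= x < 1024: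
--             feature[0] += 1
--         elif 1024 <= x < 49152:
--             feature[1] += 1
--         elif 49152 <= x < 65535:
--             feature[2] += 1
--     return feature
-- ===== Notes on version B (the rewrite author's own statement) =====
-- stated objective: simpler
-- what changed: Replaced the three filtering passes (one list comprehension per bin, each scanning all ports) with a single classifying pass that increments one of three counters per element.
import Mathlib
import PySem

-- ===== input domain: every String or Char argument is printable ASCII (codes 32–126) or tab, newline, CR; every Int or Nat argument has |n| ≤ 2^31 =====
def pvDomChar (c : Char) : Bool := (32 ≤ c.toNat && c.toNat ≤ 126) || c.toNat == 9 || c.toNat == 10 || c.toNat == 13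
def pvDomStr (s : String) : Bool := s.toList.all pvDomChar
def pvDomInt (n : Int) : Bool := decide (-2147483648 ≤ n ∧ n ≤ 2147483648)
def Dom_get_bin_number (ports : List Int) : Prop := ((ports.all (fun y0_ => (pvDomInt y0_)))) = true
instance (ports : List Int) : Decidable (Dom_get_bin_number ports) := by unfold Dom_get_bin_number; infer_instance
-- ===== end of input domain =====

-- B replaces A's three filtering passes with a single classifying pass (simpler; same results).
-- ===== PORT A =====
def bin_split_port : List Int := [0, 1024, 49152, 65535]

def get_bin_number (ports : List Int) : List Int :=
  if ports.length == 0 then List.replicate 4 0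
  else
    (PySem.List.pyRange 0 ((bin_split_port.length : Int) - 1) 1).foldl
      (fun feature idx =>
        let tmp := ports.filter (fun x =>
          PySem.List.pyGetD bin_split_port idx 0 ≤ x ∧
          x < PySem.List.pyGetD bin_split_port (idx + 1) 0)
        feature ++ [(tmp.length : Int)]) []

-- ===== PORT B =====
def get_bin_number_alt (ports : List Int) : List Int :=
  if ports = [] then [0, 0, 0, 0]
  else
    let f := ports.foldl
      (fun (acc : Int × Int × Int) x =>
        if 0 ≤ x ∧ x < 1024 then (acc.1 + 1, acc.2.1, acc.2.2)
        else if 1024 ≤ x ∧ x < 49152 then (acc.1, acc.2.1 + 1, acc.2.2)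
        else if 49152 ≤ x ∧ x < 65535 then (acc.1, acc.2.1, acc.2.2 + 1)
        else acc)
      (0, 0, 0)
    [f.1, f.2.1, f.2.2]

-- ===== PRECONDITION & SPEC =====
def Spec_get_bin_number (ports : List Int) (out : List Int) : Prop := out = get_bin_number_alt ports
instance (ports : List Int) (out : List Int) : Decidable (Spec_get_bin_number ports out) := by unfold Spec_get_bin_number; infer_instance

-- ===== CLAIM (what is proved, stated in full; the proofs are below) =====
def Claim_equal_get_bin_number : Prop := ∀ (ports : List Int), Dom_get_bin_number ports → Spec_get_bin_number ports (get_bin_number ports)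

-- ===== LEMMAS AND PROOFS =====
-- B's single pass accumulates exactly the three filter counts A computes.
theorem alt_fold_counts (l : List Int) (a b c : Int) :
    l.foldl
      (fun (acc : Int × Int × Int) x =>
        if 0 ≤ x ∧ x < 1024 then (acc.1 + 1, acc.2.1, acc.2.2)
        else if 1024 ≤ x ∧ x < 49152 then (acc.1, acc.2.1 + 1, acc.2.2)
        else if 49152 ≤ x ∧ x < 65535 then (acc.1, acc.2.1, acc.2.2 + 1)
        else acc)
      (a, b, c)
    = (a + ((l.filter fun x => (0 : Int) ≤ x ∧ x < 1024).length : Int),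
       b + ((l.filter fun x => (1024 : Int) ≤ x ∧ x < 49152).length : Int),
       c + ((l.filter fun x => (49152 : Int) ≤ x ∧ x < 65535).length : Int)) := by
  induction l generalizing a b c with
  | nil => simp
  | cons h t ih =>
    simp only [List.foldl_cons, List.filter_cons, decide_eq_true_eq]
    by_cases h1 : (0:Int) ≤ h ∧ h < 1024
    · have n2 : ¬((1024:Int) ≤ h ∧ h < 49152) := by omega
      have n3 : ¬((49152:Int) ≤ h ∧ h < 65535) := by omega
      simp only [if_pos h1, if_neg n2, if_neg n3, ih, List.length_cons]
      push_cast; ring_nf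
    · by_cases h2 : (1024:Int) ≤ h ∧ h < 49152
      · have n3 : ¬((49152:Int) ≤ h ∧ h < 65535) := by omega
        simp only [if_pos h2, if_neg h1, if_neg n3, ih, List.length_cons]
        push_cast; ring_nf
      · by_cases h3 : (49152:Int) ≤ h ∧ h < 65535
        · simp only [if_pos h3, if_neg h1, if_neg h2, ih, List.length_cons]
          push_cast; ring_nf
        · simp only [if_neg h1, if_neg h2, if_neg h3, ih]

theorem get_bin_number_spec : Claim_equal_get_bin_number := by
  intro ports _
  unfold Spec_get_bin_number get_bin_number get_bin_number_alt
  rcases ports with _ | ⟨h, t⟩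
  · decide
  · rw [show PySem.List.pyRange 0 ((bin_split_port.length : Int) - 1) 1 = [0, 1, 2] by decide]
    simp only [List.foldl_cons, List.foldl_nil]
    rw [if_neg (by simp), if_neg (by simp : ¬(h :: t = []))]
    rw [show PySem.List.pyGetD bin_split_port 0 0 = 0 from by decide,
        show PySem.List.pyGetD bin_split_port (0 + 1) 0 = 1024 from by decide,
        show PySem.List.pyGetD bin_split_port 1 0 = 1024 from by decide,
        show PySem.List.pyGetD bin_split_port (1 + 1) 0 = 49152 from by decide,
        show PySem.List.pyGetD bin_split_port 2 0 = 49152 from by decide,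
        show PySem.List.pyGetD bin_split_port (2 + 1) 0 = 65535 from by decide,
        alt_fold_counts]
    split_ifs <;> simp_all [List.filter_cons] <;> first | omega | (split_ifs <;> simp_all <;> omega)
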